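-- pv_equiv track=rewrite | github.com/iltusyou/LeetCode | 738.monotone-increasing-digits.py | findHasmonotoneDecreasingStart
-- ===== SOURCE A (Python) =====
-- def findHasmonotoneDecreasingStart(nums):
--     start = 0
--     for i in range(0, len(nums)-1):
--         if nums[i] < nums[i+1]:
--             start = i + 1
--
--         if nums[i] > nums[i+1]:
--             return start
--
--     return None
-- ===== SOURCE B (Python) =====
-- def findHasmonotoneDecreasingStart(nums):
--     pairs = list(zip(nums, nums[1:]))
--     d = None
--     for i, (x, y) in enumerate(pairs):
--         if x > y:
--             d = i
--             break
--     if d is None: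
--         return None
--     for j, (x, y) in reversed(list(enumerate(pairs[:d]))):
--         if x < y:
--             return j + 1
--     return 0
-- ===== Notes on version B (the rewrite author's own statement) =====
-- stated objective: alternative
-- what changed: Replaces A's single fused pass that incrementally tracks the start with a locate-the-first-decrease pass over adjacent pairs followed by a backward scan of the prefix for the last strict increase.
import Mathlib
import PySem

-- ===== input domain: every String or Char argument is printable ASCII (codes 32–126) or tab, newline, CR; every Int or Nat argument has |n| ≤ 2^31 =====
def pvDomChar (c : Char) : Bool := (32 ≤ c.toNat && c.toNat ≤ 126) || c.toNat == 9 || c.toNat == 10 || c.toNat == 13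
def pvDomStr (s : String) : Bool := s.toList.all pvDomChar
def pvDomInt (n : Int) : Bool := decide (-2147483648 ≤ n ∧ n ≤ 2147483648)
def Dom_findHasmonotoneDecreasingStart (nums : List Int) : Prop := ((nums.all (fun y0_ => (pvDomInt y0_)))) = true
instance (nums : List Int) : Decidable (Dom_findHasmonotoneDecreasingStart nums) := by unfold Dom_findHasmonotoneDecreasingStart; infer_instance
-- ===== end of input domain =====

-- B replaces A's single fused pass (incrementally tracked start, return at first decrease) by a
-- locate-the-first-decrease pass over adjacent pairs plus a backward scan of the prefix for the
-- last strict increase (objective: alternative decomposition, same O(n) cost).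


-- ===== PORT A =====
-- A's loop over i in range(0, len(nums)-1) comparing nums[i], nums[i+1]: the structural
-- recursion on the list walks the same adjacent pairs in the same order, carrying i and start.
def findALoop (start i : Int) : List Int → Option Int
  | a :: b :: rest =>
      let start' := if a < b then i + 1 else start
      if a > b then some start' else findALoop start' (i + 1) (b :: rest)
  | _ => none

def findHasmonotoneDecreasingStart (nums : List Int) : Option Int :=
  findALoop 0 0 nums

-- ===== PORT B =====
-- first loop of Source B: enumerate(pairs), break at first x > y, returning that index
def findFirstDec (i : Int) : List (Int × Int) → Option Int
  | [] => none
  | (x, y) :: rest => if x > y then some i else findFirstDec (i + 1) rest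

-- enumerate(l) starting at index i
def enumFrom (i : Int) : List (Int × Int) → List (Int × (Int × Int))
  | [] => []
  | p :: rest => (i, p) :: enumFrom (i + 1) rest

-- second loop of Source B: scan reversed(list(enumerate(pairs[:d]))), return j+1 at first x < y, else 0
def backScanB : List (Int × (Int × Int)) → Int
  | [] => 0
  | (j, (x, y)) :: rest => if x < y then j + 1 else backScanB rest

def findHasmonotoneDecreasingStart_alt (nums : List Int) : Option Int :=
  -- pairs = list(zip(nums, nums[1:])); pairs[:d] with d ≥ 0 is `take d.toNat`
  match findFirstDec 0 (nums.zip (nums.drop 1)) with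
  | none => none
  | some d => some (backScanB ((enumFrom 0 ((nums.zip (nums.drop 1)).take d.toNat)).reverse))

-- ===== PRECONDITION & SPEC =====
def Spec_findHasmonotoneDecreasingStart (nums : List Int) (out : Option Int) : Prop := out = findHasmonotoneDecreasingStart_alt nums
instance (nums : List Int) (out : Option Int) : Decidable (Spec_findHasmonotoneDecreasingStart nums out) := by unfold Spec_findHasmonotoneDecreasingStart; infer_instance

-- ===== CLAIM (what is proved, stated in full; the proofs are below) =====
def Claim_equal_findHasmonotoneDecreasingStart : Prop := ∀ (nums : List Int), Dom_findHasmonotoneDecreasingStart nums → Spec_findHasmonotoneDecreasingStart nums (findHasmonotoneDecreasingStart nums)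

-- ===== LEMMAS AND PROOFS =====

-- A's loop expressed over the adjacent-pair list
def loopP (start i : Int) : List (Int × Int) → Option Int
  | [] => none
  | (a, b) :: rest =>
      let start' := if a < b then i + 1 else start
      if a > b then some start' else loopP start' (i + 1) rest

-- first-decrease position as a Nat offset
def fdn : List (Int × Int) → Option Nat
  | [] => none
  | (x, y) :: rest => if x > y then some 0 else (fdn rest).map Nat.succ

def stepInc (s : Int) (e : Int × (Int × Int)) : Int :=
  if e.2.1 < e.2.2 then e.1 + 1 else s

theorem findALoop_eq_loopP : ∀ (l : List Int) (start i : Int),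
    findALoop start i l = loopP start i (l.zip (l.drop 1)) := by
  intro l
  induction l with
  | nil => intro start i; simp [findALoop, loopP]
  | cons a tail ih =>
    intro start i
    cases tail with
    | nil => simp [findALoop, loopP]
    | cons b rest =>
      simp only [findALoop, List.drop, List.zip, List.zipWith, loopP]
      split
      · rfl
      · exact ih _ _

theorem loopP_char : ∀ (P : List (Int × Int)) (start i : Int),
    loopP start i P = (fdn P).map (fun k => (enumFrom i (P.take k)).foldl stepInc start) := by
  intro P
  induction P with
  | nil => intro start i; simp [loopP, fdn]
  | cons p rest ih =>
    intro start i
    obtain ⟨x, y⟩ := p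
    by_cases h : x > y
    · have hlt : ¬ x < y := by omega
      simp [loopP, fdn, h, hlt, enumFrom]
    · simp only [loopP, fdn, if_neg h]
      rw [ih]
      cases hf : fdn rest with
      | none => simp
      | some k =>
        simp only [Option.map_some, List.take_succ_cons, enumFrom,
          List.foldl_cons, stepInc]

theorem findFirstDec_char : ∀ (P : List (Int × Int)) (i : Int),
    findFirstDec i P = (fdn P).map (fun k => i + (k : Int)) := by
  intro P
  induction P with
  | nil => intro i; simp [findFirstDec, fdn]
  | cons p rest ih =>
    intro i
    obtain ⟨x, y⟩ := p
    by_cases h : x > y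
    · simp [findFirstDec, fdn, h]
    · simp only [findFirstDec, fdn, if_neg h, ih]
      cases fdn rest with
      | none => simp
      | some k => simp; ring

theorem backScanB_reverse : ∀ (L : List (Int × (Int × Int))),
    backScanB L.reverse = L.foldl stepInc 0 := by
  intro L
  induction L using List.reverseRecOn with
  | nil => simp [backScanB]
  | append_singleton M e ih =>
    obtain ⟨j, x, y⟩ := e
    simp only [List.reverse_append, List.reverse_cons, List.reverse_nil, List.nil_append,
      List.singleton_append, backScanB, List.foldl_append, List.foldl_cons, List.foldl_nil]
    by_cases h : x < y
    · simp [h, stepInc]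
    · simp [h, stepInc, ih]

-- ===== VERDICT (by name: the statement is the Claim_ definition above) =====
theorem findHasmonotoneDecreasingStart_spec : Claim_equal_findHasmonotoneDecreasingStart := by
  intro nums _
  unfold Spec_findHasmonotoneDecreasingStart findHasmonotoneDecreasingStart
    findHasmonotoneDecreasingStart_alt
  rw [findALoop_eq_loopP, loopP_char, findFirstDec_char]
  cases hf : fdn (nums.zip (nums.drop 1)) with
  | none => simp
  | some k =>
    simp [backScanB_reverse]
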